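-- pv_equiv track=rewrite | github.com/Caprice-Instinct/kiswahili-kwanza | ai-model/src/models/pronunciation_evaluator.py | get_practice_suggestions
-- ===== SOURCE A (Python) =====
-- from typing import Dict, List, Tuple, Optional
--
-- def get_practice_suggestions(problem_phonemes: List[str]) -> List[Dict]:
--     """
--     Suggest practice exercises for problematic phonemes
--     Tailored for dyslexic learners
--     """
--
--     suggestions = []
--
--     for phoneme in problem_phonemes:
--         if phoneme in ['b', 'd']:
--             suggestions.append({
--                 'phoneme': phoneme,
--                 'exercise': 'Visual discrimination',
--                 'description': f"Practice identifying '{phoneme}' with colorful cards",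
--                 'tip': "Use your finger to trace the letter shape while saying the sound"
--             })
--
--         elif phoneme in ['a', 'e', 'i', 'o', 'u']:
--             suggestions.append({
--                 'phoneme': phoneme,
--                 'exercise': 'Vowel stretching',
--                 'description': f"Hold the '{phoneme}' sound for 3 seconds",
--                 'tip': "Watch your mouth shape in a mirror"
--             })
--
--         else:
--             suggestions.append({
--                 'phoneme': phoneme,
--                 'exercise': 'Repetition practice',
--                 'description': f"Say '{phoneme}' 5 times slowly",
--                 'tip': "Break it down into smaller parts"
--             })
--
--     return suggestions
-- ===== SOURCE B (Python) =====
-- # Category-major scatter: fill the output with default records in one pass,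
-- # then one overwrite pass per special category. Order/duplicates preserved
-- # because each slot i is written in place.
--
-- _PASSES = [
--     (('b', 'd'), 'Visual discrimination',
--      "Practice identifying '", "' with colorful cards",
--      "Use your finger to trace the letter shape while saying the sound"),
--     (('a', 'e', 'i', 'o', 'u'), 'Vowel stretching',
--      "Hold the '", "' sound for 3 seconds",
--      "Watch your mouth shape in a mirror"),
-- ]
--
--
-- def _mk(phoneme, exercise, pre, suf, tip):
--     return {'phoneme': phoneme, 'exercise': exercise,
--             'description': pre + phoneme + suf, 'tip': tip}
--
--
-- def get_practice_suggestions(problem_phonemes):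
--     out = [_mk(p, 'Repetition practice', "Say '", "' 5 times slowly",
--                "Break it down into smaller parts") for p in problem_phonemes]
--     for letters, exercise, pre, suf, tip in _PASSES:
--         for i, p in enumerate(problem_phonemes):
--             if p in letters:
--                 out[i] = _mk(p, exercise, pre, suf, tip)
--     return out
-- ===== Notes on version B (the rewrite author's own statement) =====
-- stated objective: alternative
-- what changed: Replaced A's single pass with a per-item if/elif classification by a category-major scatter: one pass pre-fills every slot with the default (repetition) record, then each special category makes its own pass overwriting the matching positions in place.
import Mathlib
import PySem

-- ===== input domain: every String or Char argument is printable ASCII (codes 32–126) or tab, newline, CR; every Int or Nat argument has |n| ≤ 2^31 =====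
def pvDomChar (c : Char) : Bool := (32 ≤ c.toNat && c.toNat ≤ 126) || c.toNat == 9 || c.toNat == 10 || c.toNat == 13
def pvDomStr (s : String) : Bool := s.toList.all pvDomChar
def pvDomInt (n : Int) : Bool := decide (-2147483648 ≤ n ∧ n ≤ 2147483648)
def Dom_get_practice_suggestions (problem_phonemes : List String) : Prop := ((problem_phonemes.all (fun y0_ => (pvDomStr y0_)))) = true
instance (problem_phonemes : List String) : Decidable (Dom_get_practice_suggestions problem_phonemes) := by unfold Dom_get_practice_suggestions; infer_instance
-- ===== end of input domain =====

-- B replaces A's per-item if/elif classification by a category-major scatter: a default-fill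
-- pass followed by one overwrite pass per special category; same O(n) cost, alternative structure.


-- ===== PORT A =====
-- loop appending one dict per phoneme; the if/elif membership tests kept in order
def pvStepA (phoneme : String) : List (String × String) :=
  if phoneme = "b" ∨ phoneme = "d" then
    [("phoneme", phoneme),
     ("exercise", "Visual discrimination"),
     ("description", "Practice identifying '" ++ phoneme ++ "' with colorful cards"),
     ("tip", "Use your finger to trace the letter shape while saying the sound")]
  else if phoneme = "a" ∨ phoneme = "e" ∨ phoneme = "i" ∨ phoneme = "o" ∨ phoneme = "u" then
    [("phoneme", phoneme),
     ("exercise", "Vowel stretching"),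
     ("description", "Hold the '" ++ phoneme ++ "' sound for 3 seconds"),
     ("tip", "Watch your mouth shape in a mirror")]
  else
    [("phoneme", phoneme),
     ("exercise", "Repetition practice"),
     ("description", "Say '" ++ phoneme ++ "' 5 times slowly"),
     ("tip", "Break it down into smaller parts")]

def get_practice_suggestions (problem_phonemes : List String) : List (List (String × String)) :=
  problem_phonemes.foldl (fun suggestions phoneme => suggestions ++ [pvStepA phoneme]) []

-- ===== PORT B =====
-- _mk: one record dict
def pvMk (phoneme exercise pre suf tip : String) : List (String × String) :=
  [("phoneme", phoneme), ("exercise", exercise),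
   ("description", pre ++ phoneme ++ suf), ("tip", tip)]

-- the _PASSES table
def pvPasses : List (List String × String × String × String × String) :=
  [(["b", "d"], "Visual discrimination",
    "Practice identifying '", "' with colorful cards",
    "Use your finger to trace the letter shape while saying the sound"),
   (["a", "e", "i", "o", "u"], "Vowel stretching",
    "Hold the '", "' sound for 3 seconds",
    "Watch your mouth shape in a mirror")]

-- one overwrite pass: 'for i, p in enumerate(problem_phonemes): if p in letters: out[i] = _mk(...)'
-- (out and problem_phonemes have equal length, so the indexed write is a zipWith)
def pvPass (letters : List String) (exercise pre suf tip : String)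
    (phonemes : List String) (out : List (List (String × String))) :
    List (List (String × String)) :=
  List.zipWith (fun o p => if p ∈ letters then pvMk p exercise pre suf tip else o) out phonemes

def get_practice_suggestions_alt (problem_phonemes : List String) : List (List (String × String)) :=
  let out := problem_phonemes.map
    (fun p => pvMk p "Repetition practice" "Say '" "' 5 times slowly" "Break it down into smaller parts")
  pvPasses.foldl
    (fun out r => pvPass r.1 r.2.1 r.2.2.1 r.2.2.2.1 r.2.2.2.2 problem_phonemes out) out

-- ===== PRECONDITION & SPEC =====
def Spec_get_practice_suggestions (problem_phonemes : List String) (out : List (List (String × String))) : Prop := out = get_practice_suggestions_alt problem_phonemes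
instance (problem_phonemes : List String) (out : List (List (String × String))) : Decidable (Spec_get_practice_suggestions problem_phonemes out) := by unfold Spec_get_practice_suggestions; infer_instance

-- ===== CLAIM (what is proved, stated in full; the proofs are below) =====
def Claim_equal_get_practice_suggestions : Prop := ∀ (problem_phonemes : List String), Dom_get_practice_suggestions problem_phonemes → Spec_get_practice_suggestions problem_phonemes (get_practice_suggestions problem_phonemes)

-- ===== LEMMAS AND PROOFS =====
-- B's result, element by element: the vowel pass last, then the b/d pass, then the default
theorem alt_eq_map (ps : List String) :
    get_practice_suggestions_alt ps = ps.map (fun p =>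
      if p ∈ (["a", "e", "i", "o", "u"] : List String) then
        pvMk p "Vowel stretching" "Hold the '" "' sound for 3 seconds" "Watch your mouth shape in a mirror"
      else if p ∈ (["b", "d"] : List String) then
        pvMk p "Visual discrimination" "Practice identifying '" "' with colorful cards"
          "Use your finger to trace the letter shape while saying the sound"
      else pvMk p "Repetition practice" "Say '" "' 5 times slowly" "Break it down into smaller parts") := by
  induction ps with
  | nil => rfl
  | cons p rest ih =>
    simp only [get_practice_suggestions_alt, pvPasses, List.foldl, pvPass, List.map,
      List.zipWith] at ih ⊢
    rw [ih]

-- per-element agreement with A's classifier (the two special categories are disjoint)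
theorem step_eq (p : String) :
    (if p ∈ (["a", "e", "i", "o", "u"] : List String) then
        pvMk p "Vowel stretching" "Hold the '" "' sound for 3 seconds" "Watch your mouth shape in a mirror"
      else if p ∈ (["b", "d"] : List String) then
        pvMk p "Visual discrimination" "Practice identifying '" "' with colorful cards"
          "Use your finger to trace the letter shape while saying the sound"
      else pvMk p "Repetition practice" "Say '" "' 5 times slowly" "Break it down into smaller parts")
    = pvStepA p := by
  by_cases hb : p = "b"; · subst hb; rfl
  by_cases hd : p = "d"; · subst hd; rfl
  by_cases ha : p = "a"; · subst ha; rfl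
  by_cases he : p = "e"; · subst he; rfl
  by_cases hi : p = "i"; · subst hi; rfl
  by_cases ho : p = "o"; · subst ho; rfl
  by_cases hu : p = "u"; · subst hu; rfl
  simp [pvStepA, pvMk, hb, hd, ha, he, hi, ho, hu]

-- ===== VERDICT (by name: the statement is the Claim_ definition above) =====
theorem get_practice_suggestions_spec : Claim_equal_get_practice_suggestions := by
  intro ps _
  unfold Spec_get_practice_suggestions get_practice_suggestions
  rw [PySem.List.foldl_append_singleton_eq_map, alt_eq_map, List.nil_append]
  exact (List.map_congr_left (fun p _ => step_eq p)).symm
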